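-- pv_equiv track=rewrite | github.com/Agentic-Environmental-Engineering/GymVerse | gem/gem/envs/RLVE/sum_triangle_area_env.py | _compute_twice_sum_triangle_areas
-- ===== SOURCE A (Python) =====
-- import functools
-- from typing import Any, List, Optional, Sequence, SupportsFloat, Tuple
--
-- def _compute_twice_sum_triangle_areas(points: Sequence[Tuple[int, int]]) -> int:
--     """
--     Compute twice the sum of areas of all triangles formed by the given points.
--     Uses an O(N^2 log N) algorithm based on sorting by polar angle and suffix sums.
--     """
--     A = sorted(points, key=lambda p: (p[0], p[1]))
--     N = len(A)
--     ans = 0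
--
--     for i in range(N):
--         xi, yi = A[i]
--         # Build vectors from A[i] to all later points
--         s = [(x - xi, y - yi) for x, y in A[i + 1 :]]
--
--         # Sort by polar angle around the origin using cross-product comparator
--         s.sort(
--             key=functools.cmp_to_key(
--                 lambda a, b: -1
--                 if a[1] * b[0] < a[0] * b[1]
--                 else (1 if a[1] * b[0] > a[0] * b[1] else 0)
--             )
--         )
--
--         m = len(s)
--         # Build suffix sums of x- and y-components
--         sx = [0] * (m + 1)
--         sy = [0] * (m + 1)
--         for j in range(m - 1, -1, -1):
--             sx[j] = sx[j + 1] + s[j][0]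
--             sy[j] = sy[j + 1] + s[j][1]
--             # Accumulate cross-products to sum triangle areas (twice the area)
--             ans += s[j][0] * sy[j + 1] - s[j][1] * sx[j + 1]
--
--     return ans
-- ===== SOURCE B (Python) =====
-- from typing import Sequence, Tuple
--
-- def _compute_twice_sum_triangle_areas(points: Sequence[Tuple[int, int]]) -> int:
--     """Twice the total triangle area: brute-force over all index triples i<j<k,
--     adding the absolute cross product of each triple. O(N^3), no sorting."""
--     pts = list(points)
--     n = len(pts)
--     ans = 0
--     for i in range(n):
--         ax, ay = pts[i]
--         for j in range(i + 1, n):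
--             bx, by = pts[j]
--             ux, uy = bx - ax, by - ay
--             for k in range(j + 1, n):
--                 cx, cy = pts[k]
--                 ans += abs(ux * (cy - ay) - uy * (cx - ax))
--     return ans
-- ===== Notes on version B (the rewrite author's own statement) =====
-- stated objective: simpler
-- what changed: Replaces the lexicographic sort + per-point polar-angle comparator sort + suffix-sum accumulation with a direct triple loop that sums the absolute cross product |cross(b-a, c-a)| over every index triple i<j<k.
import Mathlib
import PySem

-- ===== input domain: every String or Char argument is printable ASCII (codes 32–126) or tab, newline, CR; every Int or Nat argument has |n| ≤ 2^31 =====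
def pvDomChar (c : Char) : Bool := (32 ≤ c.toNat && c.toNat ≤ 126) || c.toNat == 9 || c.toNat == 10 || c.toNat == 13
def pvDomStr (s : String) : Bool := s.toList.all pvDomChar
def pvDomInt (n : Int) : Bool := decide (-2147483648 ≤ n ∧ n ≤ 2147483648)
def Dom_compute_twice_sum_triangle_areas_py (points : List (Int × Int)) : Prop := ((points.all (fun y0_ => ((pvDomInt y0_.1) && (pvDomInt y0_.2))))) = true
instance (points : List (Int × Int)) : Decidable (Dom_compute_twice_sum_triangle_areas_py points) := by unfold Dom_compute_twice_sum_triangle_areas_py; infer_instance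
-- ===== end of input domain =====

-- B replaces A's sort-by-angle + suffix-sum scheme by the plain triple loop summing |cross| per triangle: simpler (objective), not faster.

-- ===== PORT A =====
-- s.sort(key=functools.cmp_to_key(...)): a stable comparison sort; ported as the same stable
-- insertion sort PySem.List.sorted uses (PySem.List.insertBy), with the comparator's strict
-- "a before b" test a[1]*b[0] < a[0]*b[1] verbatim. Exact for a consistent comparator (ties keep
-- order); on ties the summed result is order-independent, so the returned value is Python's.
def pvSortCmp (s : List (Int × Int)) : List (Int × Int) :=
  s.foldl (fun acc x => PySem.List.insertBy (fun a b => decide (a.2 * b.1 < a.1 * b.2)) x acc) []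

-- the 'for j in range(m-1,-1,-1)' loop: recursion from the right; state = (sx[j], sy[j], ans so far)
def pvSuffixLoop : List (Int × Int) → Int × Int × Int
  | [] => (0, 0, 0)
  | (x, y) :: t =>
      let r := pvSuffixLoop t
      (r.1 + x, r.2.1 + y, r.2.2 + (x * r.2.1 - y * r.1))

-- 'for i in range(N)' over the lex-sorted list, using A[i] and A[i+1:]
def pvAOuter : List (Int × Int) → Int
  | [] => 0
  | (xi, yi) :: rest =>
      let s := rest.map (fun p => (p.1 - xi, p.2 - yi))
      (pvSuffixLoop (pvSortCmp s)).2.2 + pvAOuter rest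

def compute_twice_sum_triangle_areas_py (points : List (Int × Int)) : Int :=
  pvAOuter (PySem.List.sorted2 points (fun p => p.1) (fun p => p.2))

-- ===== PORT B =====
-- innermost 'for k' loop
def pvBInner (ax ay ux uy : Int) : List (Int × Int) → Int
  | [] => 0
  | c :: r => |ux * (c.2 - ay) - uy * (c.1 - ax)| + pvBInner ax ay ux uy r

-- middle 'for j' loop
def pvBMid (ax ay : Int) : List (Int × Int) → Int
  | [] => 0
  | b :: r => pvBInner ax ay (b.1 - ax) (b.2 - ay) r + pvBMid ax ay r

-- outer 'for i' loop
def compute_twice_sum_triangle_areas_py_alt : List (Int × Int) → Int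
  | [] => 0
  | a :: r => pvBMid a.1 a.2 r + compute_twice_sum_triangle_areas_py_alt r

-- ===== PRECONDITION & SPEC =====
def Spec_compute_twice_sum_triangle_areas_py (points : List (Int × Int)) (out : Int) : Prop := out = compute_twice_sum_triangle_areas_py_alt points
instance (points : List (Int × Int)) (out : Int) : Decidable (Spec_compute_twice_sum_triangle_areas_py points out) := by unfold Spec_compute_twice_sum_triangle_areas_py; infer_instance

-- ===== CLAIM (what is proved, stated in full; the proofs are below) =====
def Claim_equal_compute_twice_sum_triangle_areas_py : Prop := ∀ (points : List (Int × Int)), Dom_compute_twice_sum_triangle_areas_py points → Spec_compute_twice_sum_triangle_areas_py points (compute_twice_sum_triangle_areas_py points)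

-- ===== LEMMAS AND PROOFS =====

-- cross product of two vectors
def pvX (a b : Int × Int) : Int := a.1 * b.2 - a.2 * b.1

-- twice the area of triangle a b c
def pvG (a b c : Int × Int) : Int := |(b.1 - a.1) * (c.2 - a.2) - (b.2 - a.2) * (c.1 - a.1)|

-- sum of h over all ordered index pairs j < k
def pvPairSum {α : Type} (h : α → α → Int) : List α → Int
  | [] => 0
  | x :: r => ((r.map (h x)).sum) + pvPairSum h r

-- sum of pvG over all index triples i < j < k
def pvTripSum : List (Int × Int) → Int
  | [] => 0
  | a :: r => pvPairSum (pvG a) r + pvTripSum r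

-- right half-plane (vectors from a lex-smaller point to a lex-larger one)
def pvH (v : Int × Int) : Prop := 0 < v.1 ∨ (v.1 = 0 ∧ 0 ≤ v.2)

-- lexicographic order on points (Python tuple order)
def pvLexLe (p q : Int × Int) : Prop := p.1 < q.1 ∨ (p.1 = q.1 ∧ p.2 ≤ q.2)

lemma pvX_key {x y z : Int × Int} (hx : pvH x) (hy : pvH y) (hz : pvH z)
    (h1 : 0 < pvX x y) (h2 : 0 ≤ pvX y z) : 0 ≤ pvX x z := by
  have hid : y.1 * pvX x z = x.1 * pvX y z + z.1 * pvX x y := by unfold pvX; ring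
  have hx1 : 0 ≤ x.1 := by rcases hx with h | h <;> omega
  have hz1 : 0 ≤ z.1 := by rcases hz with h | h <;> omega
  rcases hy with hy1 | ⟨hy1, hy2⟩
  · -- y.1 > 0 : divide the identity
    by_contra hneg
    nlinarith [lt_of_not_ge hneg, mul_nonneg hx1 h2, mul_nonneg hz1 (le_of_lt h1)]
  · -- y = (0, y2) with y2 ≥ 0
    have hxy : 0 < x.1 * y.2 := by unfold pvX at h1; rw [hy1] at h1; linarith [h1]
    have hx1' : 0 < x.1 := by nlinarith
    have hy2' : 0 < y.2 := by nlinarith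
    have hz1' : z.1 = 0 := by
      unfold pvX at h2; rw [hy1] at h2
      nlinarith
    have hz2 : 0 ≤ z.2 := by rcases hz with h | h <;> omega
    unfold pvX
    rw [hz1']
    nlinarith

lemma pv_insertBy_perm {α : Type} (lt : α → α → Bool) (x : α) (l : List α) :
    (PySem.List.insertBy lt x l).Perm (x :: l) := by
  induction l with
  | nil => simp [PySem.List.insertBy]
  | cons y ys ih =>
      simp only [PySem.List.insertBy]
      split
      · exact List.Perm.refl _
      · exact (ih.cons y).trans (List.Perm.swap x y ys)

lemma pv_foldl_insertBy_perm {α : Type} (lt : α → α → Bool) (l acc : List α) :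
    (l.foldl (fun acc x => PySem.List.insertBy lt x acc) acc).Perm (acc ++ l) := by
  induction l generalizing acc with
  | nil => simp
  | cons x xs ih =>
      simp only [List.foldl_cons]
      refine (ih _).trans ?_
      have h1 : (PySem.List.insertBy lt x acc).Perm (x :: acc) := pv_insertBy_perm lt x acc
      exact ((h1.append_right xs).trans (List.perm_middle.symm)).symm.symm

lemma pv_insertBy_pairwise {α : Type} (lt : α → α → Bool) (R : α → α → Prop) (S : α → Prop)
    (h1 : ∀ x y, S x → S y → lt x y = true → R x y)
    (h2 : ∀ x y, S x → S y → lt x y = false → R y x)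
    (h3 : ∀ x y z, S x → S y → S z → lt x y = true → R y z → R x z)
    (x : α) (l : List α) (hS : ∀ a ∈ l, S a) (hx : S x) (hp : l.Pairwise R) :
    (PySem.List.insertBy lt x l).Pairwise R := by
  induction l with
  | nil => simp [PySem.List.insertBy]
  | cons y ys ih =>
      have hy : S y := hS y (by simp)
      have hys : ∀ a ∈ ys, S a := fun a ha => hS a (by simp [ha])
      rcases List.pairwise_cons.mp hp with ⟨hyR, hpys⟩
      simp only [PySem.List.insertBy]
      split
      · rename_i hlt
        refine List.pairwise_cons.mpr ⟨?_, hp⟩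
        intro z hz
        rcases List.mem_cons.mp hz with rfl | hz
        · exact h1 x z hx hy hlt
        · exact h3 x y z hx hy (hys z hz) hlt (hyR z hz)
      · rename_i hlt
        refine List.pairwise_cons.mpr ⟨?_, ih hys hpys⟩
        intro z hz
        rcases (PySem.List.mem_insertBy _ _ _ _).mp hz with rfl | hz
        · exact h2 z y hx hy (Bool.not_eq_true _ ▸ hlt)
        · exact hyR z hz

lemma pv_foldl_insertBy_pairwise {α : Type} (lt : α → α → Bool) (R : α → α → Prop) (S : α → Prop)
    (h1 : ∀ x y, S x → S y → lt x y = true → R x y)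
    (h2 : ∀ x y, S x → S y → lt x y = false → R y x)
    (h3 : ∀ x y z, S x → S y → S z → lt x y = true → R y z → R x z)
    (l acc : List α) (hS : ∀ a ∈ l, S a) (hacc : ∀ a ∈ acc, S a) (hp : acc.Pairwise R) :
    (l.foldl (fun acc x => PySem.List.insertBy lt x acc) acc).Pairwise R := by
  induction l generalizing acc with
  | nil => simpa using hp
  | cons x xs ih =>
      have hx : S x := hS x (by simp)
      simp only [List.foldl_cons]
      refine ih _ (fun a ha => hS a (List.mem_cons_of_mem _ ha)) ?_ ?_
      · intro a ha
        rcases (PySem.List.mem_insertBy _ _ _ _).mp ha with rfl | ha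
        · exact hx
        · exact hacc a ha
      · exact pv_insertBy_pairwise lt R S h1 h2 h3 x acc hacc hx hp

-- the comparator sort: permutation and pairwise-nonnegative cross products (on half-plane inputs)
lemma pvSortCmp_perm (s : List (Int × Int)) : (pvSortCmp s).Perm s := by
  simpa using pv_foldl_insertBy_perm (fun a b => decide (a.2 * b.1 < a.1 * b.2)) s []

lemma pvSortCmp_pairwise (s : List (Int × Int)) (hH : ∀ v ∈ s, pvH v) :
    (pvSortCmp s).Pairwise (fun a b => 0 ≤ pvX a b) := by
  refine pv_foldl_insertBy_pairwise _ (fun a b => 0 ≤ pvX a b) pvH ?_ ?_ ?_ s [] hH (by simp) (by simp)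
  · intro x y _ _ hlt
    have h : x.2 * y.1 < x.1 * y.2 := of_decide_eq_true hlt
    unfold pvX; nlinarith [h]
  · intro x y _ _ hlt
    have h : ¬ (x.2 * y.1 < x.1 * y.2) := of_decide_eq_false hlt
    unfold pvX; nlinarith [le_of_not_gt h]
  · intro x y z hx hy hz hlt hyz
    have : x.2 * y.1 < x.1 * y.2 := of_decide_eq_true hlt
    exact pvX_key hx hy hz (by unfold pvX; omega) hyz

-- sorted2 with the identity tuple key is lexicographically ordered
lemma pv_sorted2_pairwise (points : List (Int × Int)) :
    (PySem.List.sorted2 points (fun p => p.1) (fun p => p.2)).Pairwise pvLexLe := by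
  have : PySem.List.sorted2 points (fun p : Int × Int => p.1) (fun p => p.2) =
      points.foldl (fun acc x => PySem.List.insertBy
        (fun a b : Int × Int => decide (a.1 < b.1) || (!decide (b.1 < a.1) && decide (a.2 < b.2))) x acc) [] := rfl
  rw [this]
  refine pv_foldl_insertBy_pairwise _ pvLexLe (fun _ => True) ?_ ?_ ?_ points [] (by simp) (by simp) (by simp)
  · intro x y _ _ hlt
    simp only [Bool.or_eq_true, Bool.and_eq_true, Bool.not_eq_true', decide_eq_true_eq,
      decide_eq_false_iff_not] at hlt
    unfold pvLexLe; omega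
  · intro x y _ _ hlt
    simp only [Bool.or_eq_false_iff, Bool.and_eq_false_iff, Bool.not_eq_false', decide_eq_true_eq,
      decide_eq_false_iff_not] at hlt
    unfold pvLexLe; omega
  · intro x y z _ _ _ hlt hyz
    simp only [Bool.or_eq_true, Bool.and_eq_true, Bool.not_eq_true', decide_eq_true_eq,
      decide_eq_false_iff_not] at hlt
    unfold pvLexLe at *; omega

-- sum of cross products against a fixed left vector, split into components
lemma pv_sum_cross (x y : Int) (t : List (Int × Int)) :
    (t.map (pvX (x, y))).sum = x * (t.map Prod.snd).sum - y * (t.map Prod.fst).sum := by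
  induction t with
  | nil => simp
  | cons c r ih =>
      simp only [List.map_cons, List.sum_cons, ih]
      unfold pvX
      ring

-- the suffix-sum loop computes suffix sums and the pairwise cross-product sum
lemma pvSuffixLoop_eq (l : List (Int × Int)) :
    pvSuffixLoop l = ((l.map Prod.fst).sum, (l.map Prod.snd).sum, pvPairSum pvX l) := by
  induction l with
  | nil => rfl
  | cons v t ih =>
      obtain ⟨x, y⟩ := v
      simp only [pvSuffixLoop, ih, pvPairSum, List.map_cons, List.sum_cons, Prod.mk.injEq]
      refine ⟨by ring, by ring, ?_⟩
      rw [pv_sum_cross]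
      ring

-- pairwise-nonnegative order lets us drop the sign: cross sum = |cross| sum
lemma pvPairSum_abs (l : List (Int × Int)) (hp : l.Pairwise (fun a b => 0 ≤ pvX a b)) :
    pvPairSum pvX l = pvPairSum (fun a b => |pvX a b|) l := by
  induction l with
  | nil => rfl
  | cons x r ih =>
      rcases List.pairwise_cons.mp hp with ⟨hx, hr⟩
      simp only [pvPairSum]
      rw [ih hr]
      congr 1
      apply congrArg
      apply List.map_congr_left
      intro c hc
      exact (abs_of_nonneg (hx c hc)).symm

-- a pair sum of a symmetric function is invariant under permutation
lemma pvPairSum_perm {α : Type} (h : α → α → Int) (hsym : ∀ a b, h a b = h b a)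
    {l1 l2 : List α} (hp : l1.Perm l2) : pvPairSum h l1 = pvPairSum h l2 := by
  induction hp with
  | nil => rfl
  | cons x p ih =>
      simp only [pvPairSum, ih]
      congr 1
      exact List.Perm.sum_eq (p.map _)
  | swap x y l =>
      simp only [pvPairSum, List.map_cons, List.sum_cons]
      rw [hsym y x]
      ring
  | trans p q ih1 ih2 => exact ih1.trans ih2

-- pair sum over a mapped list
lemma pvPairSum_map {α β : Type} (h : β → β → Int) (f : α → β) (l : List α) :
    pvPairSum h (l.map f) = pvPairSum (fun a b => h (f a) (f b)) l := by
  induction l with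
  | nil => rfl
  | cons x r ih => simp [pvPairSum, ih, List.map_map, Function.comp_def]

-- |cross| is symmetric
lemma pvAbsX_symm (a b : Int × Int) : |pvX a b| = |pvX b a| := by
  have : pvX a b = -pvX b a := by unfold pvX; ring
  rw [this, abs_neg]

-- pvG is symmetric in its last two arguments, and in its first two
lemma pvG_symm23 (a b c : Int × Int) : pvG a b c = pvG a c b := by
  unfold pvG
  have : (b.1 - a.1) * (c.2 - a.2) - (b.2 - a.2) * (c.1 - a.1) =
      -((c.1 - a.1) * (b.2 - a.2) - (c.2 - a.2) * (b.1 - a.1)) := by ring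
  rw [this, abs_neg]

lemma pvG_symm12 (a b c : Int × Int) : pvG a b c = pvG b a c := by
  unfold pvG
  have : (b.1 - a.1) * (c.2 - a.2) - (b.2 - a.2) * (c.1 - a.1) =
      -((a.1 - b.1) * (c.2 - b.2) - (a.2 - b.2) * (c.1 - b.1)) := by ring
  rw [this, abs_neg]

-- the triple sum is invariant under permutation
lemma pvTripSum_perm {l1 l2 : List (Int × Int)} (hp : l1.Perm l2) :
    pvTripSum l1 = pvTripSum l2 := by
  induction hp with
  | nil => rfl
  | cons x p ih =>
      simp only [pvTripSum, ih]
      congr 1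
      exact pvPairSum_perm (pvG x) (pvG_symm23 x) p
  | swap x y l =>
      simp only [pvTripSum, pvPairSum]
      have h2 : l.map (pvG y x) = l.map (pvG x y) :=
        List.map_congr_left (fun c _ => pvG_symm12 y x c)
      rw [h2]
      ring
  | trans p q ih1 ih2 => exact ih1.trans ih2

-- the A outer loop on a lex-sorted list computes the triple sum
lemma pvAOuter_eq (l : List (Int × Int)) (hp : l.Pairwise pvLexLe) :
    pvAOuter l = pvTripSum l := by
  induction l with
  | nil => rfl
  | cons p rest ih =>
      obtain ⟨xi, yi⟩ := p
      rcases List.pairwise_cons.mp hp with ⟨hhead, htail⟩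
      have hH : ∀ v ∈ rest.map (fun q => (q.1 - xi, q.2 - yi)), pvH v := by
        intro v hv
        rcases List.mem_map.mp hv with ⟨q, hq, rfl⟩
        have := hhead q hq
        unfold pvLexLe at this
        unfold pvH
        omega
      have hsort := pvSortCmp_pairwise _ hH
      have hperm := pvSortCmp_perm (rest.map (fun q => (q.1 - xi, q.2 - yi)))
      simp only [pvAOuter, pvTripSum]
      rw [pvSuffixLoop_eq]
      have step : pvPairSum pvX (pvSortCmp (rest.map (fun q => (q.1 - xi, q.2 - yi)))) =
          pvPairSum (pvG (xi, yi)) rest := by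
        rw [pvPairSum_abs _ hsort,
            pvPairSum_perm (fun a b => |pvX a b|) pvAbsX_symm hperm,
            pvPairSum_map]
        rfl
      rw [step, ih htail]

-- B's triple loop computes the triple sum
lemma pvBInner_eq (ax ay ux uy : Int) (l : List (Int × Int)) :
    pvBInner ax ay ux uy l = (l.map (fun c => |ux * (c.2 - ay) - uy * (c.1 - ax)|)).sum := by
  induction l with
  | nil => rfl
  | cons c r ih => simp [pvBInner, ih]

lemma pvBMid_eq (ax ay : Int) (l : List (Int × Int)) :
    pvBMid ax ay l = pvPairSum (pvG (ax, ay)) l := by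
  induction l with
  | nil => rfl
  | cons b r ih =>
      simp only [pvBMid, pvPairSum, ih, pvBInner_eq]
      rfl

lemma pvAlt_eq (l : List (Int × Int)) :
    compute_twice_sum_triangle_areas_py_alt l = pvTripSum l := by
  induction l with
  | nil => rfl
  | cons a r ih =>
      simp only [compute_twice_sum_triangle_areas_py_alt, pvTripSum, ih, pvBMid_eq]

-- ===== VERDICT (by name: the statement is the Claim_ definition above) =====
theorem compute_twice_sum_triangle_areas_py_spec : Claim_equal_compute_twice_sum_triangle_areas_py := by
  intro points _
  unfold Spec_compute_twice_sum_triangle_areas_py compute_twice_sum_triangle_areas_py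
  rw [pvAOuter_eq _ (pv_sorted2_pairwise points),
      pvTripSum_perm (PySem.List.sorted2_perm points (fun p => p.1) (fun p => p.2) false),
      pvAlt_eq]
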